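-- pv_equiv track=rewrite | github.com/opendilab/DI-engine | dizoo/board_games/chess/chess_utils.py | get_queen_dir
-- ===== SOURCE A (Python) =====
-- def sign(v):
--     return -1 if v < 0 else (1 if v > 0 else 0)
--
-- def get_queen_dir(diff):
--     dx, dy = diff
--     assert dx == 0 or dy == 0 or abs(dx) == abs(dy)
--     magnitude = max(abs(dx), abs(dy)) - 1
--
--     assert magnitude < 8 and magnitude >= 0
--     counter = 0
--     for x in range(-1, 1 + 1):
--         for y in range(-1, 1 + 1):
--             if x == 0 and y == 0:
--                 continue
--             if x == sign(dx) and y == sign(dy):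
--                 return magnitude, counter
--             counter += 1
--     assert False, "bad queen move inputted"
-- ===== SOURCE B (Python) =====
-- def sign(v):
--     return -1 if v < 0 else (1 if v > 0 else 0)
--
-- def get_queen_dir(diff):
--     dx, dy = diff
--     assert dx == 0 or dy == 0 or abs(dx) == abs(dy)
--     magnitude = max(abs(dx), abs(dy)) - 1
--     assert magnitude < 8 and magnitude >= 0
--     raw = (sign(dx) + 1) * 3 + (sign(dy) + 1)
--     return magnitude, raw - 1 if raw > 4 else raw
-- ===== Notes on version B (the rewrite author's own statement) =====
-- stated objective: simpler
-- what changed: Replaces the nested 3x3 loop with counter by a closed-form index raw=(sign(dx)+1)*3+(sign(dy)+1), adjusted by 1 past the grid cell the loop skips.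
import Mathlib
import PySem

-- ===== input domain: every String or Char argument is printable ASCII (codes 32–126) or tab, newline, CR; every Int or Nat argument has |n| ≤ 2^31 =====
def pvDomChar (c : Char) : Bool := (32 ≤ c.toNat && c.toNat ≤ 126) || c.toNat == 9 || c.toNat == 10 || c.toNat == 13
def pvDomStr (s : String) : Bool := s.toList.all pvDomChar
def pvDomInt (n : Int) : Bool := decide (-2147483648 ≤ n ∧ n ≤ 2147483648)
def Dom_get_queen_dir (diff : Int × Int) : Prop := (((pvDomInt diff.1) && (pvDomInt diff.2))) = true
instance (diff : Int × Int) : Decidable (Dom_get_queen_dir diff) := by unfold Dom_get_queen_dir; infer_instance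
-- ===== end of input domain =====

-- B replaces A's nested 3x3 loop-with-counter by a closed-form direction index; return value only.

-- ===== PORT A =====
def pySignA (v : Int) : Int := if v < 0 then -1 else if v > 0 then 1 else 0

-- A's nested loop with early return, as a recursion over the (x,y) grid cells with the running counter
def loopA (sx sy : Int) : List (Int × Int) → Int → Option Int
  | [], _ => none
  | (x, y) :: rest, c =>
    if x = 0 ∧ y = 0 then loopA sx sy rest c
    else if x = sx ∧ y = sy then some c
    else loopA sx sy rest (c + 1)

def get_queen_dir (diff : Int × Int) : Int × Int :=
  let dx := diff.1
  let dy := diff.2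
  let magnitude := max |dx| |dy| - 1
  let cells := (PySem.List.pyRange (-1) 2 1).flatMap
    (fun x => (PySem.List.pyRange (-1) 2 1).map (fun y => (x, y)))
  match loopA (pySignA dx) (pySignA dy) cells 0 with
  | some c => (magnitude, c)
  | none => (magnitude, 0)   -- Python A raises on this branch; it is outside Pre_

-- ===== PORT B =====
def get_queen_dir_alt (diff : Int × Int) : Int × Int :=
  let dx := diff.1
  let dy := diff.2
  let magnitude := max |dx| |dy| - 1
  let raw := (pySignA dx + 1) * 3 + (pySignA dy + 1)
  (magnitude, if raw > 4 then raw - 1 else raw)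

-- ===== PRECONDITION & SPEC =====
-- Pre_ = exactly where Python A returns: both asserts pass (valid queen direction,
-- 1 ≤ max(|dx|,|dy|) ≤ 8); elsewhere A raises AssertionError.
def Pre_get_queen_dir (diff : Int × Int) : Prop :=
  (diff.1 = 0 ∨ diff.2 = 0 ∨ |diff.1| = |diff.2|) ∧
  1 ≤ max |diff.1| |diff.2| ∧ max |diff.1| |diff.2| ≤ 8
instance (diff : Int × Int) : Decidable (Pre_get_queen_dir diff) := by
  unfold Pre_get_queen_dir; infer_instance

def pvWitness_get_queen_dir : (Int × Int) := (3, -3)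

def Spec_get_queen_dir (diff : Int × Int) (out : Int × Int) : Prop := out = get_queen_dir_alt diff
instance (diff : Int × Int) (out : Int × Int) : Decidable (Spec_get_queen_dir diff out) := by
  unfold Spec_get_queen_dir; infer_instance

-- ===== CLAIM (what is proved, stated in full; the proofs are below) =====
def Claim_equal_get_queen_dir : Prop := ∀ (diff : Int × Int), Dom_get_queen_dir diff → Pre_get_queen_dir diff → Spec_get_queen_dir diff (get_queen_dir diff)

-- ===== LEMMAS AND PROOFS =====

lemma cells_eval :
    ((PySem.List.pyRange (-1) 2 1).flatMap
      (fun x => (PySem.List.pyRange (-1) 2 1).map (fun y => (x, y)))) =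
    [(-1,-1),(-1,0),(-1,1),(0,-1),(0,0),(0,1),(1,-1),(1,0),(1,1)] := by decide

lemma sign_cases (v : Int) : pySignA v = -1 ∨ pySignA v = 0 ∨ pySignA v = 1 := by
  unfold pySignA; split_ifs <;> simp

-- ===== VERDICT (by name: the statement is the Claim_ definition above) =====
theorem get_queen_dir_spec : Claim_equal_get_queen_dir := by
  intro diff _ hpre
  unfold Spec_get_queen_dir get_queen_dir get_queen_dir_alt
  obtain ⟨dx, dy⟩ := diff
  simp only [cells_eval]
  have hne : ¬ (pySignA dx = 0 ∧ pySignA dy = 0) := by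
    rintro ⟨h1, h2⟩
    have hx : dx = 0 := by unfold pySignA at h1; split_ifs at h1 <;> omega
    have hy : dy = 0 := by unfold pySignA at h2; split_ifs at h2 <;> omega
    rcases hpre with ⟨-, h, -⟩
    subst hx; subst hy
    simp at h
  rcases sign_cases dx with h1 | h1 | h1
  · rcases sign_cases dy with h2 | h2 | h2
    · simp [loopA, h1, h2]
    · simp [loopA, h1, h2]
    · simp [loopA, h1, h2]
  · rcases sign_cases dy with h2 | h2 | h2
    · simp [loopA, h1, h2]
    · exact absurd ⟨h1, h2⟩ hne
    · simp [loopA, h1, h2]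
  · rcases sign_cases dy with h2 | h2 | h2
    · simp [loopA, h1, h2]
    · simp [loopA, h1, h2]
    · simp [loopA, h1, h2]
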